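-- pv_equiv track=rewrite | github.com/uta-smile/CD-MVGNN | dglt/contrib/moses/moses/model/gvae/make_grules.py | expand_qst_n_ast_symbols
-- ===== SOURCE A (Python) =====
-- def expand_qst_n_ast_symbols(rhs_meta):
--     """Expand question & asterisk symbols."""
--
--     def __append_rhs_to_list(words, rhs, idx, rhs_list):
--         if idx == len(words):
--             rhs_list.append(rhs.strip())
--             return
--         word = words[idx]
--         if word.endswith('?') or word.endswith('*'):
--             word = word[:-1]
--             __append_rhs_to_list(words, rhs, idx + 1, rhs_list)
--         __append_rhs_to_list(words, rhs + ' ' + word, idx + 1, rhs_list)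
--
--     words = rhs_meta.split()
--     words_w_ast = set([word[:-1] for word in words if word.endswith('*')])
--     rhs_list = []
--     __append_rhs_to_list(words, '', 0, rhs_list)
--
--     return rhs_list, words_w_ast
-- ===== SOURCE B (Python) =====
-- def expand_qst_n_ast_symbols(rhs_meta):
--     """Expand question & asterisk symbols (bitmask enumeration of optional words)."""
--     words = rhs_meta.split()
--     tokens = []
--     for w in words:
--         if w.endswith('?') or w.endswith('*'):
--             tokens.append((w[:-1], True))
--         else:
--             tokens.append((w, False))
--     k = len([t for t in tokens if t[1]])
--     rhs_list = []
--     for i in range(2 ** k):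
--         parts = []
--         b = k
--         for text, opt in tokens:
--             if opt:
--                 b -= 1
--                 if (i >> b) & 1:
--                     parts.append(text)
--             else:
--                 parts.append(text)
--         rhs_list.append(' '.join(parts).strip())
--     words_w_ast = set()
--     for w in words:
--         if w.endswith('*'):
--             words_w_ast.add(w[:-1])
--     return rhs_list, words_w_ast
-- ===== Notes on version B (the rewrite author's own statement) =====
-- stated objective: alternative
-- what changed: Replaced A's recursive exclude/include DFS over a shared output list by a closed-form bitmask enumeration: classify words into (text, optional) tokens once, then for each index i in range(2**k) build the i-th combination directly by bit tests, space-joining the selected tokens and stripping once.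
import Mathlib
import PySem

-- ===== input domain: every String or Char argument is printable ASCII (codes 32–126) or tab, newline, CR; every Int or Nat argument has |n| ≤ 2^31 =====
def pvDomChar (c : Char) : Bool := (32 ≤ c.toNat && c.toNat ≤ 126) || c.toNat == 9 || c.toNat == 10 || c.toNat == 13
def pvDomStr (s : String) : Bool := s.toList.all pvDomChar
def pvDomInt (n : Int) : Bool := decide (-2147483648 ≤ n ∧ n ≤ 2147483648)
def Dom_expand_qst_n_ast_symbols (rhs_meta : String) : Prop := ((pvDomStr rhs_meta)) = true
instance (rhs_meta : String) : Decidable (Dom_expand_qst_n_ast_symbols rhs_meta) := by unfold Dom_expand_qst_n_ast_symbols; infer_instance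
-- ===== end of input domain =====

-- B replaces A's recursive exclude/include DFS over a shared output list with a closed-form
-- bitmask enumeration (classify words once, then build combination i of range(2^k) by bit tests);
-- objective: alternative algorithm, same result in the same order.

-- ===== PORT A =====
-- __append_rhs_to_list: recursion over the remaining words (Python recurses on the index idx;
-- here the suffix words[idx:] is the recursion argument — same steps, same order).
def pvAppendRhs : List String → String → List String → List String
  | [], rhs, rhs_list => rhs_list ++ [PySem.Str.strip rhs]
  | word :: rest, rhs, rhs_list =>
    if PySem.Str.endswith word "?" || PySem.Str.endswith word "*" then
      let w := PySem.Str.slice word none (some (-1))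
      pvAppendRhs rest (rhs ++ " " ++ w) (pvAppendRhs rest rhs rhs_list)
    else
      pvAppendRhs rest (rhs ++ " " ++ word) rhs_list

def expand_qst_n_ast_symbols (rhs_meta : String) : List String × List String :=
  let words := PySem.Str.split₀ rhs_meta
  let words_w_ast := PySem.Set.ofList
    ((words.filter (fun w => PySem.Str.endswith w "*")).map
      (fun w => PySem.Str.slice w none (some (-1))))
  let rhs_list := pvAppendRhs words "" []
  (rhs_list, words_w_ast)

-- ===== PORT B =====
-- loop body of B's first loop: classify one word as (text, is_optional)
def pvTok (w : String) : String × Bool :=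
  if PySem.Str.endswith w "?" || PySem.Str.endswith w "*" then
    (PySem.Str.slice w none (some (-1)), true)
  else
    (w, false)

-- loop body of B's inner loop: state (b, parts); '(i >> b) & 1' is Python's bit test on the
-- nonnegative loop index i (here a Nat, so '>>>'/'&&&' are exact)
def pvSelectStep (i : Nat) (st : Nat × List String) (tk : String × Bool) : Nat × List String :=
  if tk.2 then
    let b := st.1 - 1
    (b, if (i >>> b) &&& 1 == 1 then st.2 ++ [tk.1] else st.2)
  else
    (st.1, st.2 ++ [tk.1])

def expand_qst_n_ast_symbols_alt (rhs_meta : String) : List String × List String :=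
  let words := PySem.Str.split₀ rhs_meta
  let tokens := words.foldl (fun ts w => ts ++ [pvTok w]) []
  let k := (tokens.filter (fun t => t.2)).length
  -- Python's range(2**k) enumerates the naturals 0, …, 2^k - 1
  let rhs_list := (List.range (2 ^ k)).map (fun i =>
    PySem.Str.strip (PySem.Str.join " " (tokens.foldl (pvSelectStep i) (k, [])).2))
  let words_w_ast := words.foldl (fun s w =>
    if PySem.Str.endswith w "*" then PySem.Set.add s (PySem.Str.slice w none (some (-1))) else s)
    PySem.Set.empty
  (rhs_list, words_w_ast)

-- ===== PRECONDITION & SPEC =====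
def Spec_expand_qst_n_ast_symbols (rhs_meta : String) (out : List String × List String) : Prop := out = expand_qst_n_ast_symbols_alt rhs_meta
instance (rhs_meta : String) (out : List String × List String) : Decidable (Spec_expand_qst_n_ast_symbols rhs_meta out) := by unfold Spec_expand_qst_n_ast_symbols; infer_instance

-- ===== CLAIM (what is proved, stated in full; the proofs are below) =====
def Claim_equal_expand_qst_n_ast_symbols : Prop := ∀ (rhs_meta : String), Dom_expand_qst_n_ast_symbols rhs_meta → Spec_expand_qst_n_ast_symbols rhs_meta (expand_qst_n_ast_symbols rhs_meta)

-- ===== LEMMAS AND PROOFS =====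

-- the list of selections (as token-text lists), in A's exclude-first DFS order
def pvSel : List (String × Bool) → List (List String)
  | [] => [[]]
  | (t, opt) :: r =>
    if opt then pvSel r ++ (pvSel r).map (t :: ·) else (pvSel r).map (t :: ·)

def pvCnt (ts : List (String × Bool)) : Nat := (ts.filter (fun t => t.2)).length

-- ' ' ++ p1 ++ ' ' ++ p2 ++ … , the string A accumulates for a selection (String level / Char level)
def pvSJoin : List String → String
  | [] => ""
  | p :: ps => " " ++ p ++ pvSJoin ps

def pvSJoinL : List (List Char) → List Char
  | [] => []
  | p :: ps => ' ' :: (p ++ pvSJoinL ps)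

-- B's inner loop as a structural recursion (what the foldl over pvSelectStep computes)
def pvBuild : List (String × Bool) → Nat → Nat → List String
  | [], _, _ => []
  | (t, opt) :: r, b, i =>
    if opt then
      (if (i >>> (b - 1)) &&& 1 == 1 then t :: pvBuild r (b - 1) i else pvBuild r (b - 1) i)
    else t :: pvBuild r b i

theorem pvBit_eq (i b : Nat) : ((i >>> b) &&& 1 == 1) = Nat.testBit i b := by
  simp [Nat.testBit, Nat.and_one_is_mod, Nat.one_and_eq_mod_two]

theorem pvBitMod (i b : Nat) : (i >>> b % 2 = 1) ↔ Nat.testBit i b = true := by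
  rw [← pvBit_eq]; simp

theorem pvAppendRhs_eq :
    ∀ (ws : List String) (rhs : String) (acc : List String),
      pvAppendRhs ws rhs acc =
        acc ++ (pvSel (ws.map pvTok)).map (fun ps => PySem.Str.strip (rhs ++ pvSJoin ps)) := by
  intro ws
  induction ws with
  | nil => intro rhs acc; simp [pvAppendRhs, pvSel, pvSJoin]
  | cons w rest ih =>
    intro rhs acc
    by_cases h : (PySem.Str.endswith w "?" || PySem.Str.endswith w "*") = true
    · have ht : pvTok w = (PySem.Str.slice w none (some (-1)), true) := by
        unfold pvTok; rw [if_pos h]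
      simp only [pvAppendRhs]
      rw [if_pos h, ih, ih, List.map_cons, ht,
        show pvSel ((PySem.Str.slice w none (some (-1)), true) :: rest.map pvTok)
            = pvSel (rest.map pvTok)
              ++ (pvSel (rest.map pvTok)).map (PySem.Str.slice w none (some (-1)) :: ·) from by
          simp [pvSel],
        List.map_append, List.map_map, List.append_assoc]
      congr 1
      congr 1
      apply List.map_congr_left; intro ps _
      simp [Function.comp, pvSJoin, String.append_assoc]
    · have h' : (PySem.Str.endswith w "?" || PySem.Str.endswith w "*") = false := by
        simpa using h
      have ht : pvTok w = (w, false) := by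
        unfold pvTok; rw [if_neg (by rw [h']; exact Bool.false_ne_true)]
      simp only [pvAppendRhs]
      rw [if_neg (by rw [h']; exact Bool.false_ne_true), ih, List.map_cons, ht,
        show pvSel ((w, false) :: rest.map pvTok)
            = (pvSel (rest.map pvTok)).map (w :: ·) from by simp [pvSel],
        List.map_map]
      congr 1
      apply List.map_congr_left; intro ps _
      simp [Function.comp, pvSJoin, String.append_assoc]

theorem pvFoldl_select :
    ∀ (ts : List (String × Bool)) (i : Nat) (b : Nat) (parts : List String),
      (ts.foldl (pvSelectStep i) (b, parts)).2 = parts ++ pvBuild ts b i := by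
  intro ts
  induction ts with
  | nil => intro i b parts; simp [pvBuild]
  | cons tk rest ih =>
    intro i b parts
    obtain ⟨t, opt⟩ := tk
    cases opt with
    | false => simp [List.foldl, pvSelectStep, pvBuild, ih]
    | true =>
      by_cases hbit : i >>> (b - 1) % 2 = 1
      · simp [List.foldl, pvSelectStep, pvBuild, hbit, ih]
      · simp [List.foldl, pvSelectStep, pvBuild, hbit, ih]

theorem pvBuild_congr :
    ∀ (ts : List (String × Bool)) (b i j : Nat), pvCnt ts ≤ b →
      (∀ m, m < b → i.testBit m = j.testBit m) →
      pvBuild ts b i = pvBuild ts b j := by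
  intro ts
  induction ts with
  | nil => intro b i j _ _; rfl
  | cons tk rest ih =>
    intro b i j hc hbits
    obtain ⟨t, opt⟩ := tk
    cases opt with
    | false =>
      have hc' : pvCnt rest ≤ b := by simpa [pvCnt, List.filter_cons] using hc
      simp [pvBuild, ih b i j hc' hbits]
    | true =>
      have hc1 : pvCnt rest + 1 ≤ b := by simpa [pvCnt, List.filter_cons] using hc
      have hrec : pvBuild rest (b - 1) i = pvBuild rest (b - 1) j :=
        ih (b - 1) i j (by omega) (fun m hm => hbits m (by omega))
      have hbit : i.testBit (b - 1) = j.testBit (b - 1) := hbits (b - 1) (by omega)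
      by_cases hj : j >>> (b - 1) % 2 = 1
      · have hi2 : i >>> (b - 1) % 2 = 1 := (pvBitMod i (b - 1)).mpr (hbit ▸ (pvBitMod j (b - 1)).mp hj)
        simp [pvBuild, hi2, hj, hrec]
      · have hi2 : ¬ (i >>> (b - 1) % 2 = 1) := fun hi =>
          hj ((pvBitMod j (b - 1)).mpr (hbit ▸ (pvBitMod i (b - 1)).mp hi))
        simp [pvBuild, hi2, hj, hrec]

theorem pvBuild_range :
    ∀ (ts : List (String × Bool)),
      (List.range (2 ^ pvCnt ts)).map (fun i => pvBuild ts (pvCnt ts) i) = pvSel ts := by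
  intro ts
  induction ts with
  | nil => simp [pvCnt, pvSel, pvBuild]
  | cons tk rest ih =>
    obtain ⟨t, opt⟩ := tk
    cases opt with
    | false =>
      have hcnt : pvCnt ((t, false) :: rest) = pvCnt rest := by simp [pvCnt]
      rw [hcnt]
      simp only [pvSel, Bool.false_eq_true, if_neg, not_false_iff, ← ih, List.map_map]
      apply List.map_congr_left; intro i _
      simp [pvBuild]
    | true =>
      have hcnt : pvCnt ((t, true) :: rest) = pvCnt rest + 1 := by simp [pvCnt]
      rw [hcnt]
      have hsplit : (2 : Nat) ^ (pvCnt rest + 1) = 2 ^ pvCnt rest + 2 ^ pvCnt rest := by ring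
      rw [hsplit, List.range_add, List.map_append, List.map_map]
      simp only [pvSel, if_pos]
      congr 1
      · -- first half: bit (pvCnt rest) is 0, so every i < 2^cnt excludes t
        rw [← ih]
        apply List.map_congr_left; intro i hi
        have hlt : i < 2 ^ pvCnt rest := List.mem_range.mp hi
        have hbit0 : ¬ (i >>> pvCnt rest % 2 = 1) := by
          rw [pvBitMod]; simp [Nat.testBit_lt_two_pow hlt]
        simp [pvBuild, hbit0]
      · -- second half: i = 2^cnt + j includes t, and the lower bits agree with j
        rw [← ih, List.map_map]
        apply List.map_congr_left; intro j hj
        have hlt : j < 2 ^ pvCnt rest := List.mem_range.mp hj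
        have hbit1 : (2 ^ pvCnt rest + j) >>> pvCnt rest % 2 = 1 := by
          rw [pvBitMod]
          simp [Nat.testBit_two_pow_add_eq, Nat.testBit_lt_two_pow hlt]
        have hrec : pvBuild rest (pvCnt rest) (2 ^ pvCnt rest + j) = pvBuild rest (pvCnt rest) j :=
          pvBuild_congr rest (pvCnt rest) _ j (le_refl _)
            (fun m hm => Nat.testBit_two_pow_add_gt hm j)
        simp [Function.comp, pvBuild, hbit1, hrec]

theorem pvSJoin_toList (ps : List String) :
    (pvSJoin ps).toList = pvSJoinL (ps.map String.toList) := by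
  induction ps with
  | nil => rfl
  | cons p ps ih => simp [pvSJoin, pvSJoinL, ih]

theorem pvJoin_cons (a : List Char) (ls : List (List Char)) :
    PySem.Chars.join [' '] (a :: ls) = a ++ pvSJoinL ls := by
  induction ls generalizing a with
  | nil => simp [PySem.Chars.join_singleton, pvSJoinL]
  | cons b ls ih => simp [PySem.Chars.join_cons_cons, ih, pvSJoinL]

theorem pvStrip_sjoin (ps : List String) :
    PySem.Str.strip (pvSJoin ps) = PySem.Str.strip (PySem.Str.join " " ps) := by
  apply String.toList_inj.mp
  rw [PySem.Str.toList_strip, PySem.Str.toList_strip, PySem.Str.toList_join, pvSJoin_toList]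
  show PySem.Chars.strip _ = PySem.Chars.strip (PySem.Chars.join [' '] _)
  cases hps : ps.map String.toList with
  | nil => rfl
  | cons a ls =>
    rw [pvJoin_cons]
    simp [pvSJoinL, PySem.Chars.strip, PySem.Chars.lstrip, List.dropWhile_cons,
      show PySem.Chars.isspace ' ' = true from rfl]

theorem pvSet_foldl (ws : List String) :
    ∀ (s : PySem.Set String),
      ws.foldl (fun s w =>
          if PySem.Str.endswith w "*" then
            PySem.Set.add s (PySem.Str.slice w none (some (-1))) else s) s =
        PySem.Set.update s
          ((ws.filter (fun w => PySem.Str.endswith w "*")).map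
            (fun w => PySem.Str.slice w none (some (-1)))) := by
  induction ws with
  | nil => intro s; rfl
  | cons w ws ih =>
    intro s
    by_cases h : PySem.Str.endswith w "*" = true
    · simp only [List.foldl_cons, List.filter_cons, h, if_true, List.map_cons,
        PySem.Set.update_cons, ih]
    · simp only [Bool.not_eq_true] at h
      simp only [List.foldl_cons, List.filter_cons, h, Bool.false_eq_true, if_neg,
        not_false_iff, ih]

-- ===== VERDICT (by name: the statement is the Claim_ definition above) =====
theorem expand_qst_n_ast_symbols_spec : Claim_equal_expand_qst_n_ast_symbols := by
  intro rhs_meta _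
  unfold Spec_expand_qst_n_ast_symbols expand_qst_n_ast_symbols expand_qst_n_ast_symbols_alt
  simp only [PySem.List.foldl_append_singleton_eq_map, List.nil_append]
  refine Prod.ext ?_ ?_
  · -- rhs lists
    show pvAppendRhs (PySem.Str.split₀ rhs_meta) "" [] = _
    rw [pvAppendRhs_eq]
    have hk : ((((PySem.Str.split₀ rhs_meta).map pvTok).filter (fun t => t.2)).length)
        = pvCnt ((PySem.Str.split₀ rhs_meta).map pvTok) := rfl
    simp only [List.nil_append, hk]
    have := pvBuild_range ((PySem.Str.split₀ rhs_meta).map pvTok)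
    rw [show (fun i => PySem.Str.strip (PySem.Str.join " "
          (((PySem.Str.split₀ rhs_meta).map pvTok).foldl (pvSelectStep i)
            (pvCnt ((PySem.Str.split₀ rhs_meta).map pvTok), [])).2))
        = (fun i => PySem.Str.strip (PySem.Str.join " "
            (pvBuild ((PySem.Str.split₀ rhs_meta).map pvTok)
              (pvCnt ((PySem.Str.split₀ rhs_meta).map pvTok) ) i))) from
      funext (fun i => by rw [pvFoldl_select]; simp)]
    rw [show (fun i => PySem.Str.strip (PySem.Str.join " "
            (pvBuild ((PySem.Str.split₀ rhs_meta).map pvTok)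
              (pvCnt ((PySem.Str.split₀ rhs_meta).map pvTok)) i)))
        = (fun ps => PySem.Str.strip (PySem.Str.join " " ps)) ∘
            (fun i => pvBuild ((PySem.Str.split₀ rhs_meta).map pvTok)
              (pvCnt ((PySem.Str.split₀ rhs_meta).map pvTok)) i) from rfl]
    rw [← List.map_map, this]
    apply List.map_congr_left; intro ps _
    rw [String.empty_append, pvStrip_sjoin]
  · -- words_w_ast sets
    show PySem.Set.ofList _ = _
    rw [pvSet_foldl]
    exact (PySem.Set.update_nil_left _).symm
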